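-- pv_equiv track=rewrite | github.com/DaryaBelka/pp1 | 13-Test3/p4.py | f
-- ===== SOURCE A (Python) =====
-- def f(d):
--    in_car_park = {}
--    for i in d:
--       registration, action = i[0], i[1]
--       if action == "in":
--             in_car_park[registration] = True
--       elif action == "out":
--          if registration in in_car_park:
--             del in_car_park[registration]
--    return sorted(in_car_park.keys())
-- ===== SOURCE B (Python) =====
-- def f(d):
--     seen = set()
--     result = set()
--     for i in reversed(list(d)):
--         registration, action = i[0], i[1]
--         if registration in seen:
--             continue
--         if action == "in":
--             result.add(registration)
--             seen.add(registration)
--         elif action == "out":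
--             seen.add(registration)
--     return sorted(result)
-- ===== Notes on version B (the rewrite author's own statement) =====
-- stated objective: alternative
-- what changed: Replaces the forward dict mutation (insert on 'in', delete on 'out') by a single reverse scan that decides each registration from its last in/out event using a seen-set, collecting members into a set before sorting.
import Mathlib
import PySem

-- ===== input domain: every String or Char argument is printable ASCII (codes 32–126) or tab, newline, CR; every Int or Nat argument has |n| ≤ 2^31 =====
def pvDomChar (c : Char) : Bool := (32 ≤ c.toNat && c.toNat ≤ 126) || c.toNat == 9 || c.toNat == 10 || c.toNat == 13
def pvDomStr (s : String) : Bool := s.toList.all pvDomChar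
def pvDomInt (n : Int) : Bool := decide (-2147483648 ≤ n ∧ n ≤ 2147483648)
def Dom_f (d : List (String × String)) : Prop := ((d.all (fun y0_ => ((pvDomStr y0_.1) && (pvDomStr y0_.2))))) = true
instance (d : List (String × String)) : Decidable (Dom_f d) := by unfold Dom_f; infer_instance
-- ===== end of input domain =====

-- B replaces A's forward dict mutation by a reverse scan deciding each registration
-- from its last in/out event (alternative decomposition, same asymptotic cost).

-- ===== PORT A =====
def fStep (park : PySem.Dict String Bool) (i : String × String) : PySem.Dict String Bool :=
  let registration := i.1
  let action := i.2
  if action = "in" then park.insert registration true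
  else if action = "out" then
    (if park.contains registration then park.erase registration else park)
  else park

def f (d : List (String × String)) : List String :=
  let in_car_park := d.foldl fStep PySem.Dict.empty
  PySem.List.sorted in_car_park.keys (fun x => x) false

-- ===== PORT B =====
def fAltStep (st : PySem.Set String × PySem.Set String) (i : String × String) :
    PySem.Set String × PySem.Set String :=
  let registration := i.1
  let action := i.2
  if st.1.contains registration then st
  else if action = "in" then (PySem.Set.add st.1 registration, PySem.Set.add st.2 registration)
  else if action = "out" then (PySem.Set.add st.1 registration, st.2)
  else st

def f_alt (d : List (String × String)) : List String :=
  let st := d.reverse.foldl fAltStep (PySem.Set.empty, PySem.Set.empty)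
  PySem.List.sorted st.2 (fun x => x) false

-- ===== PRECONDITION & SPEC =====
def Spec_f (d : List (String × String)) (out : List String) : Prop := out = f_alt d
instance (d : List (String × String)) (out : List String) : Decidable (Spec_f d out) := by unfold Spec_f; infer_instance

-- ===== CLAIM (what is proved, stated in full; the proofs are below) =====
def Claim_equal_f : Prop := ∀ (d : List (String × String)), Dom_f d → Spec_f d (f d)

-- ===== LEMMAS AND PROOFS =====

-- "first decisive (in/out) event wins" scan from the front of a list
def decide1 : List (String × String) → String → Option Bool
  | [], _ => none
  | (r, a) :: t, reg =>
      if r = reg then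
        (if a = "in" then some true else if a = "out" then some false else decide1 t reg)
      else decide1 t reg

theorem decide1_append (l₁ l₂ : List (String × String)) (reg : String) :
    decide1 (l₁ ++ l₂) reg =
      (match decide1 l₁ reg with | some b => some b | none => decide1 l₂ reg) := by
  induction l₁ with
  | nil => simp [decide1]
  | cons h t ih =>
      obtain ⟨r, a⟩ := h
      simp only [List.cons_append, decide1]
      split_ifs <;> simp [ih]

theorem contains_erase (d : PySem.Dict String Bool) (k reg : String) :
    (d.erase k).contains reg = if reg = k then false else d.contains reg := by
  simp only [PySem.Dict.erase, PySem.Dict.contains, List.any_filter]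
  split_ifs with h
  · subst h; simp
  · congr 1; funext p
    by_cases hp : p.1 = reg <;> simp [hp, h]

theorem contains_fStep (park : PySem.Dict String Bool) (r a reg : String) :
    (fStep park (r, a)).contains reg =
      (if r = reg then
        (if a = "in" then true else if a = "out" then false else park.contains reg)
       else park.contains reg) := by
  simp only [fStep]
  by_cases hin : a = "in"
  · by_cases hr : r = reg
    · subst hr; simp [hin, PySem.Dict.contains_insert_self]
    · simp [hin, hr, PySem.Dict.contains_insert, Ne.symm hr]
  · by_cases hout : a = "out"
    · by_cases hc : park.contains r
      · by_cases hr : r = reg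
        · subst hr; simp [hout, hc, contains_erase]
        · simp [hout, hc, hr, contains_erase, Ne.symm hr]
      · by_cases hr : r = reg
        · subst hr; simp [hout, hc]
        · simp [hout, hc, hr]
    · by_cases hr : r = reg <;> simp [hin, hout, hr]

theorem contA (d : List (String × String)) :
    ∀ (park : PySem.Dict String Bool) (reg : String),
      (d.foldl fStep park).contains reg =
        (match decide1 d.reverse reg with | some b => b | none => park.contains reg) := by
  induction d with
  | nil => intro park reg; simp [decide1]
  | cons h t ih =>
      intro park reg
      obtain ⟨r, a⟩ := h
      simp only [List.foldl_cons, List.reverse_cons, decide1_append, ih]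
      cases hd : decide1 t.reverse reg with
      | some b => simp
      | none =>
          simp only [decide1, contains_fStep]
          by_cases hr : r = reg
          · by_cases hin : a = "in"
            · simp [hr, hin]
            · by_cases hout : a = "out" <;> simp [hr, hin, hout]
          · simp [hr]

theorem nodup_keys_erase (d : PySem.Dict String Bool) (k : String)
    (h : d.keys.Nodup) : (d.erase k).keys.Nodup := by
  simp only [PySem.Dict.erase, PySem.Dict.keys] at *
  exact h.sublist ((List.filter_sublist).map _)

theorem nodup_keysA (d : List (String × String)) :
    ∀ (park : PySem.Dict String Bool), park.keys.Nodup → (d.foldl fStep park).keys.Nodup := by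
  induction d with
  | nil => intro park h; simpa using h
  | cons x t ih =>
      intro park h
      refine ih _ ?_
      simp only [fStep]
      split_ifs with h1 h2 h3
      · exact (PySem.Dict.nodup_keys_insert _ _ _ h)
      · exact nodup_keys_erase _ _ h
      · exact h
      · exact h

theorem memB (l : List (String × String)) :
    ∀ (seen result : PySem.Set String) (reg : String),
      (∀ x ∈ result, x ∈ seen) →
      (reg ∈ (l.foldl fAltStep (seen, result)).2 ↔
        (if reg ∈ seen then reg ∈ result
         else (match decide1 l reg with
               | some true => True
               | some false => False
               | none => reg ∈ result))) := by
  induction l with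
  | nil => intro seen result reg hsub; simp [decide1]
  | cons h t ih =>
      intro seen result reg hsub
      obtain ⟨r, a⟩ := h
      simp only [List.foldl_cons, fAltStep, decide1]
      by_cases hrs : r ∈ seen
      · rw [if_pos (by simpa [PySem.Set.contains_iff] using hrs)]
        rw [ih seen result reg hsub]
        by_cases hreg : reg ∈ seen
        · simp [hreg]
        · have hne : ¬ r = reg := fun e => hreg (e ▸ hrs)
          simp [hreg, hne]
      · rw [if_neg (by simpa [PySem.Set.contains_iff] using hrs)]
        by_cases hin : a = "in"
        · simp only [hin, if_true]
          rw [ih _ _ reg (by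
            intro x hx
            rcases (PySem.Set.mem_add _ _ _).1 hx with hx | hx
            · exact (PySem.Set.mem_add _ _ _).2 (Or.inl (hsub x hx))
            · exact (PySem.Set.mem_add _ _ _).2 (Or.inr hx))]
          by_cases hrr : r = reg
          · subst hrr
            simp [PySem.Set.mem_add, hrs]
          · have h1 : (reg ∈ PySem.Set.add seen r) ↔ reg ∈ seen := by
              simp [PySem.Set.mem_add, Ne.symm hrr]
            have h2 : (reg ∈ PySem.Set.add result r) ↔ reg ∈ result := by
              simp [PySem.Set.mem_add, Ne.symm hrr]
            by_cases hreg : reg ∈ seen <;> simp [h1, h2, hreg, hrr]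
        · by_cases hout : a = "out"
          · simp only [hout, if_true]
            rw [ih _ _ reg (by
              intro x hx
              exact (PySem.Set.mem_add _ _ _).2 (Or.inl (hsub x hx)))]
            by_cases hrr : r = reg
            · subst hrr
              have : ¬ r ∈ result := fun hx => hrs (hsub r hx)
              simp [hrs, this]
            · have h1 : (reg ∈ PySem.Set.add seen r) ↔ reg ∈ seen := by
                simp [PySem.Set.mem_add, Ne.symm hrr]
              by_cases hreg : reg ∈ seen <;> simp [h1, hreg, hrr]
          · simp only [hin, hout, if_false]
            rw [ih seen result reg hsub]
            by_cases hrr : r = reg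
            · subst hrr; simp [hrs]
            · simp [hrr]

theorem nodupB (l : List (String × String)) :
    ∀ (seen result : PySem.Set String), result.Nodup →
      (l.foldl fAltStep (seen, result)).2.Nodup := by
  induction l with
  | nil => intro _ _ h; simpa using h
  | cons x t ih =>
      intro seen result h
      simp only [List.foldl_cons, fAltStep]
      split_ifs
      · exact ih _ _ h
      · exact ih _ _ (PySem.Set.nodup_add _ _ h)
      · exact ih _ _ h
      · exact ih _ _ h

theorem mem_final_eq (d : List (String × String)) (reg : String) :
    (reg ∈ (d.foldl fStep PySem.Dict.empty).keys ↔
      reg ∈ (d.reverse.foldl fAltStep (PySem.Set.empty, PySem.Set.empty)).2) := by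
  have hA := contA d PySem.Dict.empty reg
  rw [PySem.Dict.contains_eq_decide_mem_keys] at hA
  have hB := memB d.reverse PySem.Set.empty PySem.Set.empty reg (by intro x hx; simp at hx)
  rw [hB]
  have he : ¬ reg ∈ (PySem.Set.empty : PySem.Set String) := by simp [PySem.Set.empty]
  rw [if_neg he]
  constructor
  · intro h
    have : decide (reg ∈ (d.foldl fStep PySem.Dict.empty).keys) = true := by simpa using h
    rw [hA] at this
    cases hd : decide1 d.reverse reg with
    | some b =>
        rw [hd] at this
        cases b with
        | true => simp
        | false => simp at this
    | none =>
        rw [hd] at this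
        simp [PySem.Dict.contains_empty] at this
  · intro h
    have : decide (reg ∈ (d.foldl fStep PySem.Dict.empty).keys) = true := by
      rw [hA]
      cases hd : decide1 d.reverse reg with
      | some b =>
          rw [hd] at h
          cases b with
          | true => simp
          | false => simp at h
      | none =>
          rw [hd] at h
          exact absurd h he
    simpa using this

-- ===== VERDICT (by name: the statement is the Claim_ definition above) =====
theorem f_spec : Claim_equal_f := by
  intro d _
  unfold Spec_f f f_alt
  apply PySem.List.sorted_eq_sorted_of_perm _ _ _ (fun a b h => h)
  rw [List.perm_ext_iff_of_nodup
    (nodup_keysA d PySem.Dict.empty (by simp [PySem.Dict.keys_empty]))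
    (nodupB d.reverse PySem.Set.empty PySem.Set.empty List.nodup_nil)]
  exact fun reg => mem_final_eq d reg
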